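-- pv_equiv track=rewrite | github.com/wcarvalho/KindredHistories | backend/agent.py | create_demographic_string
-- ===== SOURCE A (Python) =====
-- from typing import Any, Dict, List, Optional, Tuple, Union
--
-- def create_demographic_string(combo: Dict[str, str]) -> str:
--   """Create a readable string from a demographic combination dictionary."""
--   parts = []
--   # prioritize certain keys for readability
--   order = [
--     "race",
--     "ethnicity",
--     "cultural_background",
--     "gender",
--     "sexuality",
--     "profession",
--     "interest",
--     "aspiration",
--   ]
--
--   for key in order:
--     if key in combo:
--       parts.append(combo[key])
--
--   # append any others
--   for k, v in combo.items():
--     if k not in order: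
--       parts.append(v)
--
--   return ", ".join(parts)
-- ===== SOURCE B (Python) =====
-- def create_demographic_string(combo):
--   """Create a readable string from a demographic combination dictionary."""
--   order = [
--     "race",
--     "ethnicity",
--     "cultural_background",
--     "gender",
--     "sexuality",
--     "profession",
--     "interest",
--     "aspiration",
--   ]
--   rank = {k: i for i, k in enumerate(order)}
--   n = len(order)
--   return ", ".join(v for _, v in sorted(combo.items(), key=lambda kv: rank.get(kv[0], n)))
-- ===== Notes on version B (the rewrite author's own statement) =====
-- stated objective: simpler
-- what changed: Replaces A's two passes (scan the priority list probing the dict, then rescan the items for leftovers) with a single stable sort of combo.items() under a precomputed rank key (rank.get(k, len(order))), joining the values once.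
import Mathlib
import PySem

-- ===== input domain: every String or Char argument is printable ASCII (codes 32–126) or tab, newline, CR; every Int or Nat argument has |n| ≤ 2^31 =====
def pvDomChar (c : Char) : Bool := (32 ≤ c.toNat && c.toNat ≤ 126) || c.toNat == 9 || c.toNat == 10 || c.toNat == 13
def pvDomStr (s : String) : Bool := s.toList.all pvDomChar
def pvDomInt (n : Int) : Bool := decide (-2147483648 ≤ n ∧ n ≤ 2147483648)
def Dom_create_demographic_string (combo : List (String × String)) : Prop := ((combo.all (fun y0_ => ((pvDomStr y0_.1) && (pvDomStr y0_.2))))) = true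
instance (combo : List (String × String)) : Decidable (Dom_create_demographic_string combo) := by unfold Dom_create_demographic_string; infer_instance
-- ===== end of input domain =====

-- B replaces A's two passes (priority scan + leftover scan) by ONE stable sort of the
-- items under a rank key read off a rank dictionary; objective: simpler/idiomatic.

-- the priority list, shared verbatim by both Pythons
def pvOrder : List String :=
  ["race", "ethnicity", "cultural_background", "gender",
   "sexuality", "profession", "interest", "aspiration"]

-- ===== PORT A =====
def create_demographic_string (combo : List (String × String)) : String :=
  let parts : List String := []
  -- for key in order: if key in combo: parts.append(combo[key])
  let parts := pvOrder.foldl (fun acc key =>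
    match (PySem.Dict.mk combo).get? key with
    | some v => acc ++ [v]
    | none => acc) parts
  -- for k, v in combo.items(): if k not in order: parts.append(v)
  let parts := combo.foldl (fun acc kv =>
    if kv.1 ∈ pvOrder then acc else acc ++ [kv.2]) parts
  PySem.Str.join ", " parts

-- ===== PORT B =====
-- rank = {k: i for i, k in enumerate(order)}
def pvRank : PySem.Dict String Int :=
  (PySem.List.enumerate pvOrder).foldl (fun d p => d.insert p.2 p.1) PySem.Dict.empty

def create_demographic_string_alt (combo : List (String × String)) : String :=
  let n : Int := PySem.List.len pvOrder
  PySem.Str.join ", "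
    ((PySem.List.sorted combo (fun kv => pvRank.getD kv.1 n) false).map (fun kv => kv.2))

-- ===== PRECONDITION & SPEC =====
-- Pre_ asks only that the keys be pairwise distinct: the Python argument is a dict, and an
-- association list with a duplicated key does not represent any Python dict.
def Pre_create_demographic_string (combo : List (String × String)) : Prop :=
  (combo.map Prod.fst).Nodup
instance (combo : List (String × String)) : Decidable (Pre_create_demographic_string combo) := by
  unfold Pre_create_demographic_string; infer_instance

def pvWitness_create_demographic_string : (List (String × String)) :=
  [("hobby", "chess"), ("gender", "female"), ("race", "martian")]

def Spec_create_demographic_string (combo : List (String × String)) (out : String) : Prop :=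
  out = create_demographic_string_alt combo
instance (combo : List (String × String)) (out : String) : Decidable (Spec_create_demographic_string combo out) := by
  unfold Spec_create_demographic_string; infer_instance

-- ===== CLAIM (what is proved, stated in full; the proofs are below) =====
def Claim_equal_create_demographic_string : Prop := ∀ (combo : List (String × String)), Dom_create_demographic_string combo → Pre_create_demographic_string combo → Spec_create_demographic_string combo (create_demographic_string combo)

-- ===== LEMMAS AND PROOFS =====

-- the rank key as a plain if-chain
set_option maxHeartbeats 2000000 in
theorem pvRank_getD (k : String) :
    pvRank.getD k 8 =
      if k = "race" then 0 else if k = "ethnicity" then 1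
      else if k = "cultural_background" then 2 else if k = "gender" then 3
      else if k = "sexuality" then 4 else if k = "profession" then 5
      else if k = "interest" then 6 else if k = "aspiration" then 7 else 8 := by
  have h : pvRank = PySem.Dict.mk
      [("race", 0), ("ethnicity", 1), ("cultural_background", 2), ("gender", 3),
       ("sexuality", 4), ("profession", 5), ("interest", 6), ("aspiration", 7)] := rfl
  rw [h]
  simp only [PySem.Dict.getD, PySem.Dict.get?_mk_cons, beq_iff_eq]
  clear h
  split_ifs <;> first | rfl | (exfalso; simp_all)

theorem pvRank_mem_range (k : String) :
    pvRank.getD k 8 ∈ ([0, 1, 2, 3, 4, 5, 6, 7, 8] : List Int) := by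
  rw [pvRank_getD]; split_ifs <;> simp

-- insertBy walks past a block it does not go before
theorem insertBy_append_not {α : Type} (before : α → α → Bool) (x : α) (ys zs : List α)
    (h : ∀ y ∈ ys, before x y = false) :
    PySem.List.insertBy before x (ys ++ zs) = ys ++ PySem.List.insertBy before x zs := by
  induction ys with
  | nil => simp
  | cons a t ih =>
      simp only [List.cons_append, PySem.List.insertBy, h a (by simp)]
      simp only [Bool.false_eq_true, if_false, List.cons_inj_right]
      exact ih fun y hy => h y (by simp [hy])

-- insertBy stops in front of a block it goes before (also applies to the empty block)
theorem insertBy_all {α : Type} (before : α → α → Bool) (x : α) (zs : List α)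
    (h : ∀ y ∈ zs, before x y = true) :
    PySem.List.insertBy before x zs = x :: zs := by
  cases zs with
  | nil => rfl
  | cons a t => simp [PySem.List.insertBy, h a (by simp)]

-- inserting into a bucket concatenation appends to the right bucket
theorem insertBy_flatMap {α : Type} (key : α → Int) (idxs : List Int)
    (hs : idxs.Pairwise (· < ·)) (G : Int → List α)
    (hG : ∀ i ∈ idxs, ∀ a ∈ G i, key a = i) (x : α) (hr : key x ∈ idxs) :
    PySem.List.insertBy (fun a b => decide (key a < key b)) x (idxs.flatMap G) =
      idxs.flatMap (fun i => if i = key x then G i ++ [x] else G i) := by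
  induction idxs with
  | nil => simp at hr
  | cons i t ih =>
      rw [List.flatMap_cons, List.flatMap_cons]
      rcases List.mem_cons.mp hr with hi | hrt
      · have h1 : ∀ y ∈ G i, (fun a b => decide (key a < key b)) x y = false := by
          intro y hy
          simp [hG i (List.mem_cons_self) y hy, ← hi]
        rw [insertBy_append_not _ _ _ _ h1]
        have h2 : ∀ y ∈ t.flatMap G, (fun a b => decide (key a < key b)) x y = true := by
          intro y hy
          obtain ⟨j, hj, hyG⟩ := List.mem_flatMap.mp hy
          have hkj : key y = j := hG j (List.mem_cons_of_mem _ hj) y hyG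
          have hij : i < j := (List.pairwise_cons.mp hs).1 j hj
          simp only [decide_eq_true_eq, hkj]
          omega
        rw [insertBy_all _ _ _ h2, if_pos hi.symm]
        have ht : t.flatMap (fun j => if j = key x then G j ++ [x] else G j) = t.flatMap G := by
          refine List.flatMap_congr fun j hj => ?_
          have hij : i < j := (List.pairwise_cons.mp hs).1 j hj
          rw [if_neg (by omega)]
        rw [ht]
        simp
      · have hik : i < key x := (List.pairwise_cons.mp hs).1 _ hrt
        have h1 : ∀ y ∈ G i, (fun a b => decide (key a < key b)) x y = false := by
          intro y hy
          have := hG i (List.mem_cons_self) y hy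
          simp only [decide_eq_false_iff_not, this]
          omega
        rw [insertBy_append_not _ _ _ _ h1,
          ih (List.pairwise_cons.mp hs).2 (fun j hj => hG j (List.mem_cons_of_mem _ hj)) hrt,
          if_neg (by omega)]

-- the stable sort is the concatenation of the key-buckets in key order
theorem sorted_eq_buckets {α : Type} (l : List α) (key : α → Int) (idxs : List Int)
    (hs : idxs.Pairwise (· < ·)) (hmem : ∀ a ∈ l, key a ∈ idxs) :
    PySem.List.sorted l key false =
      idxs.flatMap (fun i => l.filter (fun a => decide (key a = i))) := by
  induction l using List.reverseRecOn with
  | nil => simp [PySem.List.sorted]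
  | append_singleton l x ih =>
      rw [PySem.List.sorted_eq_foldl_insertBy, List.foldl_append, List.foldl_cons, List.foldl_nil,
        ← PySem.List.sorted_eq_foldl_insertBy,
        ih (fun a ha => hmem a (by simp [ha])),
        insertBy_flatMap key idxs hs _
          (fun i _ a ha => by simpa using (List.mem_filter.mp ha).2)
          x (hmem x (by simp))]
      refine List.flatMap_congr fun i hi => ?_
      rw [List.filter_append]
      by_cases h : i = key x
      · rw [if_pos h]
        simp [h]
      · rw [if_neg h]
        have : ¬ (key x = i) := fun hc => h hc.symm
        simp [this]

-- with distinct keys, filtering on one key is exactly the dict lookup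
theorem filter_fst_eq (l : List (String × String)) (hnd : (l.map Prod.fst).Nodup) (s : String) :
    l.filter (fun kv => decide (kv.1 = s)) =
      ((PySem.Dict.mk l).get? s).elim [] (fun v => [(s, v)]) := by
  induction l with
  | nil => rfl
  | cons a t ih =>
      rw [List.map_cons, List.nodup_cons] at hnd
      rw [List.filter_cons, PySem.Dict.get?_mk_cons]
      by_cases h : a.1 = s
      · rw [if_pos (by simpa using h), if_pos (by simpa using h)]
        have ht : t.filter (fun kv => decide (kv.1 = s)) = [] := by
          rw [List.filter_eq_nil_iff]
          intro b hb
          simp only [decide_eq_true_eq]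
          intro hbs
          exact hnd.1 (h ▸ hbs ▸ List.mem_map_of_mem hb)
        rw [ht]
        obtain ⟨a1, a2⟩ := a
        simp only at h
        subst h
        rfl
      · rw [if_neg (by simpa using h), if_neg (by simpa using h)]
        exact ih hnd.2

-- A's first loop collects the present priority values
theorem foldl_match_get (f : String → Option String) (l : List String) (acc : List String) :
    l.foldl (fun a k => match f k with | some v => a ++ [v] | none => a) acc =
      acc ++ l.filterMap f := by
  induction l generalizing acc with
  | nil => simp
  | cons a t ih => cases h : f a <;> simp [h, ih]

-- A's second loop collects the non-priority values
theorem foldl_other (l : List (String × String)) (acc : List String) :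
    l.foldl (fun a kv => if kv.1 ∈ pvOrder then a else a ++ [kv.2]) acc =
      acc ++ (l.filter (fun kv => decide (kv.1 ∉ pvOrder))).map Prod.snd := by
  induction l generalizing acc with
  | nil => simp
  | cons a t ih => by_cases h : a.1 ∈ pvOrder <;> simp [h, ih]

theorem filterMap_cons_toList {α β : Type} (f : α → Option β) (a : α) (l : List α) :
    List.filterMap f (a :: l) = (f a).toList ++ List.filterMap f l := by
  cases h : f a <;> simp [h]

-- one priority bucket, read through the dict
theorem bucket_lt (combo : List (String × String)) (hnd : (combo.map Prod.fst).Nodup)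
    (s : String) (i : Int) (hchar : ∀ k : String, pvRank.getD k 8 = i ↔ k = s) :
    (combo.filter (fun kv => decide (pvRank.getD kv.1 8 = i))).map Prod.snd =
      ((PySem.Dict.mk combo).get? s).toList := by
  rw [List.filter_congr (q := fun kv => decide (kv.1 = s)) (fun kv _ => by simp [hchar]),
    filter_fst_eq combo hnd s]
  cases (PySem.Dict.mk combo).get? s <;> simp

theorem rank_iff_0 (k : String) : pvRank.getD k 8 = 0 ↔ k = "race" := by
  rw [pvRank_getD]; split_ifs <;> simp_all

theorem rank_iff_1 (k : String) : pvRank.getD k 8 = 1 ↔ k = "ethnicity" := by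
  rw [pvRank_getD]; split_ifs <;> simp_all

theorem rank_iff_2 (k : String) : pvRank.getD k 8 = 2 ↔ k = "cultural_background" := by
  rw [pvRank_getD]; split_ifs <;> simp_all

theorem rank_iff_3 (k : String) : pvRank.getD k 8 = 3 ↔ k = "gender" := by
  rw [pvRank_getD]; split_ifs <;> simp_all

theorem rank_iff_4 (k : String) : pvRank.getD k 8 = 4 ↔ k = "sexuality" := by
  rw [pvRank_getD]; split_ifs <;> simp_all

theorem rank_iff_5 (k : String) : pvRank.getD k 8 = 5 ↔ k = "profession" := by
  rw [pvRank_getD]; split_ifs <;> simp_all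

theorem rank_iff_6 (k : String) : pvRank.getD k 8 = 6 ↔ k = "interest" := by
  rw [pvRank_getD]; split_ifs <;> simp_all

theorem rank_iff_7 (k : String) : pvRank.getD k 8 = 7 ↔ k = "aspiration" := by
  rw [pvRank_getD]; split_ifs <;> simp_all

theorem rank8_iff (k : String) : pvRank.getD k 8 = 8 ↔ k ∉ pvOrder := by
  rw [pvRank_getD]; split_ifs <;> simp_all [pvOrder]

-- ===== VERDICT (by name: the statement is the Claim_ definition above) =====
theorem create_demographic_string_spec : Claim_equal_create_demographic_string := by
  intro combo _ hpre
  unfold Spec_create_demographic_string create_demographic_string create_demographic_string_alt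
  have hn : PySem.List.len pvOrder = (8 : Int) := by decide
  simp only [hn]
  congr 1
  rw [foldl_match_get, foldl_other, List.nil_append,
    sorted_eq_buckets combo (fun kv => pvRank.getD kv.1 8) [0, 1, 2, 3, 4, 5, 6, 7, 8]
      (by decide) (fun a _ => pvRank_mem_range a.1),
    List.map_flatMap]
  simp only [List.flatMap_cons, List.flatMap_nil, List.append_nil]
  rw [bucket_lt combo hpre "race" 0 rank_iff_0,
    bucket_lt combo hpre "ethnicity" 1 rank_iff_1,
    bucket_lt combo hpre "cultural_background" 2 rank_iff_2,
    bucket_lt combo hpre "gender" 3 rank_iff_3,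
    bucket_lt combo hpre "sexuality" 4 rank_iff_4,
    bucket_lt combo hpre "profession" 5 rank_iff_5,
    bucket_lt combo hpre "interest" 6 rank_iff_6,
    bucket_lt combo hpre "aspiration" 7 rank_iff_7]
  have h8 : combo.filter (fun kv => decide (pvRank.getD kv.1 8 = 8)) =
      combo.filter (fun kv => decide (kv.1 ∉ pvOrder)) :=
    List.filter_congr (fun kv _ => by simp [rank8_iff])
  rw [h8]
  simp only [pvOrder, filterMap_cons_toList, List.filterMap_nil, List.append_nil,
    List.append_assoc]
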